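-- pv_equiv track=rewrite | github.com/ahoque1999/competitive_programming | weather.py | nonpos
-- ===== SOURCE A (Python) =====
-- from typing import NamedTuple, List
--
-- def nonpos(lis: List[int]) -> List[int]:
--     """ return number of non positive numbers
--     to the left of each boundary """
--
--     n_lis = len(lis)
--     ret = [0] * (n_lis-1)
--     for ind in range(n_lis-1, 1-1, -1):
--         try:
--             ret[ind-1] = ret[ind] + (1 if lis[ind] <= 0 else 0)
--         except IndexError:
--             ret[ind-1] = 1 if lis[ind] <= 0 else 0
--     return ret
-- ===== SOURCE B (Python) =====
-- from typing import List
--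
-- def nonpos(lis: List[int]) -> List[int]:
--     """ return number of non positive numbers
--     to the left of each boundary """
--     return [sum(1 for x in lis[j+1:] if x <= 0) for j in range(len(lis) - 1)]
-- ===== Notes on version B (the rewrite author's own statement) =====
-- stated objective: simpler
-- what changed: Replaced A's right-to-left accumulating pass over a preallocated array with try/except sentinel handling by a single comprehension that, for each boundary index j, independently counts the non-positive values in the suffix lis[j+1:].
import Mathlib
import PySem

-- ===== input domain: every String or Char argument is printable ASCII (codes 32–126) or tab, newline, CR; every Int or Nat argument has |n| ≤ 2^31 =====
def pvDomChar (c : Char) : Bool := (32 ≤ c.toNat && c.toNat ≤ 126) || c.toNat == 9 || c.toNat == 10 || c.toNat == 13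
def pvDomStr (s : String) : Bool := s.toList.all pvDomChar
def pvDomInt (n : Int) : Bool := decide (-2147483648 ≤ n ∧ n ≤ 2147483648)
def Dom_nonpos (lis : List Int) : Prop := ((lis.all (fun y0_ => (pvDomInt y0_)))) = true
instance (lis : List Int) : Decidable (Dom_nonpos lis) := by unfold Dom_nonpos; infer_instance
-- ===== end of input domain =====

-- B replaces A's right-to-left accumulating pass (preallocated array + try/except sentinel)
-- by a single comprehension that rescans each suffix; objective: simpler.

-- ===== PORT A =====
-- one loop step: `try: ret[ind-1] = ret[ind] + (1 if lis[ind] <= 0 else 0)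
--                 except IndexError: ret[ind-1] = 1 if lis[ind] <= 0 else 0`
-- (ind ranges over n-1 … 1, so lis[ind] and ret[ind-1] are always in range:
--  the only IndexError the try can see is ret[ind] at ind = n-1; the `none` arms
--  for lis[ind] / ret[ind-1] below are unreachable)
def nonposStep (lis ret : List Int) (ind : Int) : List Int :=
  match PySem.List.pyGet? lis ind with
  | none => ret   -- unreachable: 1 ≤ ind ≤ len lis - 1
  | some x =>
    let v : Int := if x ≤ 0 then 1 else 0
    match PySem.List.pyGet? ret ind with
    | some r => PySem.List.pySetD ret (ind - 1) (r + v)   -- try-branch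
    | none   => PySem.List.pySetD ret (ind - 1) v         -- except IndexError

def nonpos (lis : List Int) : List Int :=
  let n : Int := lis.length
  let ret : List Int := List.replicate (n - 1).toNat 0
  List.foldl (nonposStep lis) ret (PySem.List.pyRange (n - 1) 0 (-1))

-- ===== PORT B =====
-- [sum(1 for x in lis[j+1:] if x <= 0) for j in range(len(lis) - 1)]
def nonpos_alt (lis : List Int) : List Int :=
  (PySem.List.pyRange 0 ((lis.length : Int) - 1) 1).map (fun j =>
    (((PySem.List.slice lis (some (j + 1)) none).filter (fun x => x ≤ 0)).map
      (fun _ => (1 : Int))).sum)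

-- ===== PRECONDITION & SPEC =====
def Spec_nonpos (lis : List Int) (out : List Int) : Prop := out = nonpos_alt lis
instance (lis : List Int) (out : List Int) : Decidable (Spec_nonpos lis out) := by unfold Spec_nonpos; infer_instance

-- ===== CLAIM (what is proved, stated in full; the proofs are below) =====
def Claim_equal_nonpos : Prop := ∀ (lis : List Int), Dom_nonpos lis → Spec_nonpos lis (nonpos lis)

-- ===== LEMMAS AND PROOFS =====

-- count of non-positive entries of l, as B computes it for one suffix
def pvCnt (l : List Int) : Int := ((l.filter (fun x => x ≤ 0)).map (fun _ => (1 : Int))).sum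

-- the common value of both sides
def pvTgt (lis : List Int) : List Int :=
  (List.range (lis.length - 1)).map (fun j => pvCnt (lis.drop (j + 1)))

lemma pvCnt_cons (x : Int) (l : List Int) :
    pvCnt (x :: l) = (if x ≤ 0 then 1 else 0) + pvCnt l := by
  by_cases h : x ≤ 0 <;> simp [pvCnt, h]

-- the countdown index list [m, m-1, …, 1]
def pvInds (m : Nat) : List Int := (List.range m).map (fun k : Nat => (m : Int) - (k : Int))

lemma pvInds_succ (m : Nat) : pvInds (m + 1) = ((m : Int) + 1) :: pvInds m := by
  unfold pvInds
  rw [List.range_succ_eq_map, List.map_cons, List.map_map]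
  refine congrArg₂ List.cons ?_ ?_
  · push_cast; ring
  · apply List.map_congr_left
    intro k _
    simp only [Function.comp_apply]
    push_cast; ring

lemma pvTgt_length (lis : List Int) : (pvTgt lis).length = lis.length - 1 := by
  simp [pvTgt]

-- the loop invariant state after having processed indices n-1 … k+1
def pvState (lis : List Int) (k : Nat) : List Int :=
  List.replicate k 0 ++ (pvTgt lis).drop k

lemma pvTgt_getElem (lis : List Int) (j : Nat) (h : j < lis.length - 1) :
    (pvTgt lis)[j]'(by simpa [pvTgt_length] using h) = pvCnt (lis.drop (j + 1)) := by
  simp [pvTgt]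

lemma pvStep_state (lis : List Int) (k : Nat) (h1 : 1 ≤ k) (h2 : k ≤ lis.length - 1) :
    nonposStep lis (pvState lis k) (k : Int) = pvState lis (k - 1) := by
  have hn : k < lis.length := by omega
  have hx : PySem.List.pyGet? lis (k : Int) = some (lis[k]'hn) := by
    rw [PySem.List.pyGet?_natCast]; simp [hn]
  have hstlen : (pvState lis k).length = lis.length - 1 := by
    simp [pvState, pvTgt_length]; omega
  have hset : ((k : Int) - 1) = ((k - 1 : Nat) : Int) := by omega
  -- value written at position k-1 is the suffix count for boundary k-1
  have hval : ∀ r : Int,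
      (PySem.List.pyGet? (pvState lis k) (k : Int) = some r →
        r + (if lis[k]'hn ≤ 0 then (1:Int) else 0) = pvCnt (lis.drop k)) := by
    intro r hr
    rw [PySem.List.pyGet?_natCast] at hr
    have hk : k < (pvState lis k).length := by
      rw [List.getElem?_eq_some_iff] at hr; exact hr.1
    have hk' : k < lis.length - 1 := by omega
    have : r = pvCnt (lis.drop (k + 1)) := by
      rw [List.getElem?_eq_some_iff] at hr
      obtain ⟨hlt, hr⟩ := hr
      rw [← hr]
      have hdrop : (pvState lis k)[k]'hlt = ((pvTgt lis).drop k)[0]'(by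
        simp [pvTgt_length]; omega) := by
        simp [pvState]
      rw [hdrop, List.getElem_drop]
      simp only [Nat.add_zero]
      exact pvTgt_getElem lis k hk'
    rw [this]
    have hd : lis.drop k = lis[k]'hn :: lis.drop (k + 1) :=
      (List.drop_eq_getElem_cons hn)
    rw [hd, pvCnt_cons]; ring
  have hdrop1 : (pvTgt lis).drop (k - 1) = pvCnt (lis.drop k) :: (pvTgt lis).drop k := by
    have hk1 : k - 1 < (pvTgt lis).length := by rw [pvTgt_length]; omega
    rw [List.drop_eq_getElem_cons hk1]
    have : k - 1 + 1 = k := by omega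
    rw [this]
    congr 1
    have := pvTgt_getElem lis (k - 1) (by omega)
    simpa [Nat.sub_add_cancel h1] using this
  have hsetres : ∀ v : Int, v = pvCnt (lis.drop k) →
      PySem.List.pySetD (pvState lis k) ((k : Int) - 1) v = pvState lis (k - 1) := by
    intro v hv
    rw [hset, PySem.List.pySetD_natCast]
    subst hv
    simp only [pvState]
    rw [hdrop1]
    have : (List.replicate k (0:Int)) = List.replicate (k-1) (0:Int) ++ [0] := by
      have : k = (k - 1) + 1 := by omega
      rw [this]; simp [List.replicate_succ']
    rw [this, List.append_assoc, List.singleton_append,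
      List.set_append_right _ _ (by simp)]
    simp
  unfold nonposStep
  rw [hx]
  simp only
  by_cases hcase : k < lis.length - 1
  · have hr : PySem.List.pyGet? (pvState lis k) (k : Int) =
        some ((pvState lis k)[k]'(by omega)) := by
      rw [PySem.List.pyGet?_natCast]; simp
    rw [hr]
    apply hsetres
    exact hval _ hr
  · -- k = lis.length - 1: ret[ind] raises IndexError, except-branch
    have hk : k = lis.length - 1 := by omega
    have hr : PySem.List.pyGet? (pvState lis k) (k : Int) = none := by
      rw [PySem.List.pyGet?_natCast]
      simp [hstlen]; omega
    rw [hr]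
    refine hsetres _ ?_
    have hd : lis.drop k = lis[k]'hn :: lis.drop (k + 1) :=
      (List.drop_eq_getElem_cons hn)
    have hnil : lis.drop (k + 1) = [] := by
      apply List.drop_eq_nil_of_le; omega
    rw [hd, pvCnt_cons, hnil]
    simp [pvCnt]

lemma pvFold_inds (lis : List Int) (m : Nat) (hm : m ≤ lis.length - 1) :
    List.foldl (nonposStep lis) (pvState lis m) (pvInds m) = pvTgt lis := by
  induction m with
  | zero => simp [pvInds, pvState]
  | succ m ih =>
    rw [pvInds_succ, List.foldl_cons]
    have h1 : ((m : Int) + 1) = ((m + 1 : Nat) : Int) := by push_cast; ring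
    rw [h1, pvStep_state lis (m + 1) (by omega) hm]
    simpa using ih (by omega)

lemma pvNonpos_eq_tgt (lis : List Int) : nonpos lis = pvTgt lis := by
  show List.foldl (nonposStep lis) (List.replicate (((lis.length : Int) - 1)).toNat 0)
      (PySem.List.pyRange ((lis.length : Int) - 1) 0 (-1)) = pvTgt lis
  rw [PySem.List.pyRange_neg_one]
  have h1 : (((lis.length : Int) - 1) - 0).toNat = lis.length - 1 := by omega
  have h2 : ((lis.length : Int) - 1).toNat = lis.length - 1 := by omega
  have h3 : (List.range (lis.length - 1)).map (fun k : Nat => ((lis.length : Int) - 1) - (k : Int))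
      = pvInds (lis.length - 1) := by
    unfold pvInds
    apply List.map_congr_left
    intro k hk
    simp at hk
    omega
  rw [h1, h3]
  have hstate : List.replicate ((lis.length : Int) - 1).toNat (0:Int)
      = pvState lis (lis.length - 1) := by
    rw [h2]
    simp [pvState, pvTgt_length, List.drop_eq_nil_of_le]
  rw [hstate]
  exact pvFold_inds lis (lis.length - 1) le_rfl

lemma pvAlt_eq_tgt (lis : List Int) : nonpos_alt lis = pvTgt lis := by
  unfold nonpos_alt pvTgt
  rw [PySem.List.pyRange_one]
  rw [List.map_map]
  have h1 : (((lis.length : Int) - 1) - 0).toNat = lis.length - 1 := by omega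
  rw [h1]
  apply List.map_congr_left
  intro k hk
  simp only [Function.comp]
  have : (0 : Int) + (k : Int) + 1 = ((k + 1 : Nat) : Int) := by push_cast; ring
  rw [this, PySem.List.slice_from_natCast]
  rfl

-- ===== VERDICT (by name: the statement is the Claim_ definition above) =====
theorem nonpos_spec : Claim_equal_nonpos := by
  intro lis _
  unfold Spec_nonpos
  rw [pvNonpos_eq_tgt, pvAlt_eq_tgt]
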